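-- pv_equiv track=rewrite | github.com/alejohz/sudoku | sudoku.py | _transform
-- ===== SOURCE A (Python) =====
-- from typing import List, Optional
--
-- def _transform(problem_grid: List[List]) -> List[List]:
--     """
--     Transforms the problem_grid passed, testing the sudoku has three main comparisons.
--     Assuming we have an untransformed grid, we have:
--         1. All rows must have each number from 1 to 9 with no repetition
--         2. All columns must have each number from 1 to 9 with no repetition
--         3. All 3x3 squares must have each number from 1 to 9 with no repetition
--     These last conditions are assuming we have a 9x9 grid with 81 numbers in total.
--
--     To be able to easily check for rows, columns and squares, we transform the grid, to convert each 3x3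
--     square to a 1x9 row. These way in the untransformed version we check rows and columns
--     In the transformed version we check rows, and now we have checked every condition.
--     Parameters:
--     - problem_grid (list): Sudoku grid (Transformed or Untransformed).
--     Returns (list).
--     - transformed grid .
--         If problem_grid is the original sudoku it converts it
--         If the problem_grid is the already transformed sudoku, it unrolls it
--     """
--     file_lines = problem_grid
--     problem_grid = [[] for _ in range(len(file_lines))]  # Empty grid
--     sqrt_n = 3  # this parameter could change if one wants to generalize for sudokus of other dimensions
--     for j in range(len(file_lines)):
--         line_values = [(int(value) if value != 0 else None)
--                        for value in file_lines[j]]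
--         for i in range(len(line_values)):
--             problem_grid[
--                 int(i / sqrt_n) +
--                 int(j / sqrt_n) * sqrt_n
--             ].append(line_values[i])
--     return problem_grid
-- ===== SOURCE B (Python) =====
-- from typing import List, Optional
--
-- def _transform(problem_grid: List[List]) -> List[List]:
--     # Gather per destination row: output row k is the concatenation, over source
--     # rows j, of the contiguous slice of row j whose cells land in row k
--     # (those i with i//3 + 3*(j//3) == k), converted by the same rule.
--     n = len(problem_grid)
--     out = []
--     for k in range(n):
--         row = []
--         for j in range(n):
--             start = 3 * (k - 3 * (j // 3))
--             if start >= 0: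
--                 row.extend(int(v) if v != 0 else None
--                            for v in problem_grid[j][start:start + 3])
--         out.append(row)
--     return out
-- ===== Notes on version B (the rewrite author's own statement) =====
-- stated objective: alternative
-- what changed: B gathers each output row directly (for each destination row k it concatenates, per source row, the contiguous slice whose cells map to k), instead of A's scatter that appends each source cell into a computed destination row, and B is total where A can raise IndexError.
import Mathlib
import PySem

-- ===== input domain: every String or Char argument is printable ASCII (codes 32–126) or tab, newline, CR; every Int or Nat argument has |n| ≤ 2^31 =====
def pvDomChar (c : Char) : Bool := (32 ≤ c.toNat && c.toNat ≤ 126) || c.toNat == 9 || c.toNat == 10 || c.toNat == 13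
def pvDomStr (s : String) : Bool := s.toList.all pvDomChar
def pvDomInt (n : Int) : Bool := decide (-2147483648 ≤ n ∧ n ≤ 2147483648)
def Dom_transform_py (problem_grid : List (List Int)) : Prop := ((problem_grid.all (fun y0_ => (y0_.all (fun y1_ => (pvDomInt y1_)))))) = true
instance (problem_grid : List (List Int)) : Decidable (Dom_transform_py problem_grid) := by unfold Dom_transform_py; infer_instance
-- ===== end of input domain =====

-- B gathers each output row directly (per destination row, the contiguous slice of each
-- source row that lands there) instead of A's scatter-append into a computed row index;
-- same cost class ("alternative"), and B is total where A can raise IndexError.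

-- ===== PORT A =====
-- `int(value) if value != 0 else None`
def pvConv (v : Int) : Option Int := if v ≠ 0 then some v else none

-- `int(i / 3)` on the nonnegative loop indices is exactly Nat division by 3.
def transform_py (problem_grid : List (List Int)) : List (List (Option Int)) :=
  (List.range problem_grid.length).foldl
    (fun acc j =>
      let line := (problem_grid.getD j []).map pvConv
      (List.range line.length).foldl
        (fun acc2 i =>
          acc2.set (i / 3 + (j / 3) * 3)
            ((acc2.getD (i / 3 + (j / 3) * 3) []) ++ [line.getD i none]))
        acc)
    (List.replicate problem_grid.length [])

-- ===== PORT B =====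
-- `problem_grid[j][start:start+3]` with start ≥ 0 is exactly drop/take.
def transform_py_alt (problem_grid : List (List Int)) : List (List (Option Int)) :=
  (List.range problem_grid.length).map (fun k =>
    (List.range problem_grid.length).foldl
      (fun row j =>
        if 3 * (j / 3) ≤ k then
          row ++ (((problem_grid.getD j []).drop (3 * (k - 3 * (j / 3)))).take 3).map pvConv
        else row)
      [])

-- ===== PRECONDITION & SPEC =====
-- Pre_ excludes exactly the inputs on which A raises IndexError (a source cell whose
-- destination row index i//3 + 3*(j//3) is ≥ the number of rows); A returns on all others.
def Pre_transform_py (problem_grid : List (List Int)) : Prop :=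
  ∀ p ∈ problem_grid.zipIdx, p.1.length ≤ 3 * (problem_grid.length - 3 * (p.2 / 3))
instance (problem_grid : List (List Int)) : Decidable (Pre_transform_py problem_grid) := by
  unfold Pre_transform_py; infer_instance
def pvWitness_transform_py : List (List Int) := [[1, 0, 2], [0, 3, 0], [4, 0, 5]]

def Spec_transform_py (problem_grid : List (List Int)) (out : List (List (Option Int))) : Prop := out = transform_py_alt problem_grid
instance (problem_grid : List (List Int)) (out : List (List (Option Int))) : Decidable (Spec_transform_py problem_grid out) := by unfold Spec_transform_py; infer_instance

-- ===== CLAIM (what is proved, stated in full; the proofs are below) =====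
def Claim_equal_transform_py : Prop := ∀ (problem_grid : List (List Int)), Dom_transform_py problem_grid → Pre_transform_py problem_grid → Spec_transform_py problem_grid (transform_py problem_grid)

-- ===== LEMMAS AND PROOFS =====

-- the scatter step of A, as a function of a (destination, value) pair
def pvStep (acc : List (List (Option Int))) (p : Nat × Option Int) : List (List (Option Int)) :=
  acc.set p.1 ((acc.getD p.1 []) ++ [p.2])

lemma pvFoldl_flatMap {α β γ : Type} (l : List α) (f : α → List β) (g : γ → β → γ) (b : γ) :
    (l.flatMap f).foldl g b = l.foldl (fun b a => (f a).foldl g b) b := by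
  induction l generalizing b with
  | nil => rfl
  | cons a l ih => simp [List.flatMap_cons, List.foldl_append, ih]

lemma pvFoldl_append {α β : Type} (l : List α) (f : α → List β) (b : List β) :
    l.foldl (fun r a => r ++ f a) b = b ++ l.flatMap f := by
  induction l generalizing b with
  | nil => simp
  | cons a l ih => simp [List.flatMap_cons, ih]

lemma pvStep_length (ops : List (Nat × Option Int)) (init : List (List (Option Int))) :
    (ops.foldl pvStep init).length = init.length := by
  induction ops generalizing init with
  | nil => rfl
  | cons p rest ih => simpa [pvStep] using ih (pvStep init p)

lemma pvScatter (ops : List (Nat × Option Int)) (init : List (List (Option Int)))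
    (h : ∀ p ∈ ops, p.1 < init.length) (k : Nat) :
    (ops.foldl pvStep init).getD k [] =
      init.getD k [] ++ (ops.filter (fun p => p.1 == k)).map Prod.snd := by
  induction ops generalizing init with
  | nil => simp
  | cons p rest ih =>
    have hp : p.1 < init.length := h p (by simp)
    rw [List.foldl_cons, ih _ (by intro q hq; simpa [pvStep] using h q (by simp [hq]))]
    have hstep : ∀ k', (pvStep init p).getD k' [] =
        if p.1 = k' then init.getD k' [] ++ [p.2] else init.getD k' [] := by
      intro k'
      unfold pvStep
      by_cases hpk : p.1 = k'
      · subst hpk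
        rw [List.getD_eq_getElem _ _ (by simpa using hp), List.getElem_set_self,
          List.getD_eq_getElem _ _ hp, if_pos rfl]
      · rw [if_neg hpk]
        by_cases hk : k' < init.length
        · rw [List.getD_eq_getElem _ _ (by simpa using hk), List.getD_eq_getElem _ _ hk,
            List.getElem_set_ne hpk]
        · rw [List.getD_eq_default _ _ (by simpa using (Nat.le_of_not_lt hk)),
            List.getD_eq_default _ _ (Nat.le_of_not_lt hk)]
    rw [hstep k, List.filter_cons]
    by_cases hpk : p.1 = k
    · simp [hpk]
    · simp [hpk]

lemma pvRange_filter_div (L q : Nat) :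
    (List.range L).filter (fun i => i / 3 == q) =
      List.range' (3 * q) (min L (3 * q + 3) - 3 * q) := by
  induction L with
  | zero => simp
  | succ L ih =>
    rw [List.range_succ, List.filter_append, ih]
    by_cases h : L / 3 = q
    · have h1 : 3 * q ≤ L ∧ L < 3 * q + 3 := by omega
      have hmin : min (L + 1) (3 * q + 3) - 3 * q = (min L (3 * q + 3) - 3 * q) + 1 := by omega
      have hL : L = 3 * q + (min L (3 * q + 3) - 3 * q) := by omega
      rw [hmin, List.range'_concat]
      simp [h, ← hL]
    · have hmin : min (L + 1) (3 * q + 3) - 3 * q = min L (3 * q + 3) - 3 * q := by omega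
      simp [h]
      omega

lemma pvMap_getD_range' (line : List (Option Int)) (s c : Nat) (hc : c ≤ line.length - s) :
    (List.range' s c).map (fun i => line.getD i none) = (line.drop s).take c := by
  induction c generalizing s with
  | zero => simp
  | succ c ih =>
    have hs : s < line.length := by omega
    rw [List.range'_succ, List.map_cons, List.drop_eq_getElem_cons hs]
    rw [List.take_succ_cons, ih (s + 1) (by omega), List.getD_eq_getElem _ _ hs]

lemma pvRow_piece (line : List (Option Int)) (m k : Nat) :
    (((List.range line.length).map (fun i => (i / 3 + m * 3, line.getD i none))).filter
        (fun p => p.1 == k)).map Prod.snd =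
      if 3 * m ≤ k then (line.drop (3 * (k - 3 * m))).take 3 else [] := by
  rw [List.filter_map, List.map_map]
  by_cases hmk : 3 * m ≤ k
  · have hcong : (List.range line.length).filter
        ((fun (p : Nat × Option Int) => p.1 == k) ∘ (fun i => (i / 3 + m * 3, line.getD i none)))
        = (List.range line.length).filter (fun i => i / 3 == k - 3 * m) := by
      apply List.filter_congr
      intro i _
      simp only [Function.comp]
      by_cases h : i / 3 = k - 3 * m <;> simp [h] <;> omega
    rw [hcong, pvRange_filter_div]
    have h3 : min line.length (3 * (k - 3 * m) + 3) - 3 * (k - 3 * m)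
        ≤ line.length - 3 * (k - 3 * m) := by omega
    rw [show ((fun (p : Nat × Option Int) => p.2) ∘ (fun i => (i / 3 + m * 3, line.getD i none)))
        = (fun i => line.getD i none) from rfl, pvMap_getD_range' _ _ _ h3]
    have : (line.drop (3 * (k - 3 * m))).take 3
        = (line.drop (3 * (k - 3 * m))).take (min line.length (3 * (k - 3 * m) + 3) - 3 * (k - 3 * m)) := by
      by_cases hL : line.length ≤ 3 * (k - 3 * m) + 3
      · rw [List.take_of_length_le (by simp; omega), List.take_of_length_le (by simp; omega)]
      · congr 1; omega
    rw [if_pos hmk, this]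
  · rw [if_neg hmk, List.map_eq_nil_iff, List.filter_eq_nil_iff]
    intro i hi
    simp only [List.mem_range] at hi
    simp only [Function.comp_apply, beq_iff_eq]
    omega

theorem transform_py_spec : Claim_equal_transform_py := by
  intro g _ hpre
  unfold Spec_transform_py
  -- row-length bound from Pre_, via zipIdx
  have hrow : ∀ j, j < g.length → (g.getD j []).length ≤ 3 * (g.length - 3 * (j / 3)) := by
    intro j hj
    have hmem : (g[j], j) ∈ g.zipIdx := by
      have : g.zipIdx[j]'(by simpa using hj) = (g[j], j) := by simp
      exact this ▸ List.getElem_mem _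
    have := hpre _ hmem
    rw [List.getD_eq_getElem _ _ hj]
    simpa using this
  -- A as a scatter over the flattened (destination, value) pairs
  set n := g.length with hn
  set opsrow : Nat → List (Nat × Option Int) := fun j =>
    (List.range ((g.getD j []).map pvConv).length).map
      (fun i => (i / 3 + (j / 3) * 3, ((g.getD j []).map pvConv).getD i none)) with hopsrow
  have hA : transform_py g = ((List.range n).flatMap opsrow).foldl pvStep (List.replicate n []) := by
    rw [pvFoldl_flatMap]
    unfold transform_py
    congr 1
    funext acc j
    rw [hopsrow]
    rw [List.foldl_map]
    rfl
  have hfst : ∀ p ∈ (List.range n).flatMap opsrow, p.1 < (List.replicate n ([] : List (Option Int))).length := by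
    intro p hp
    rw [List.mem_flatMap] at hp
    obtain ⟨j, hj, hpj⟩ := hp
    rw [List.mem_range] at hj
    rw [hopsrow, List.mem_map] at hpj
    obtain ⟨i, hi, hpi⟩ := hpj
    rw [List.mem_range, List.length_map] at hi
    have hb := hrow j hj
    simp only [List.length_replicate, ← hpi]
    omega
  -- both sides row by row
  apply List.ext_getElem
  · rw [hA, pvStep_length]
    simp [transform_py_alt]
    exact hn
  · intro k h1 h2
    have hk : k < n := by
      rw [hA, pvStep_length] at h1; simpa using h1
    have hAk : (transform_py g)[k]'h1 = (transform_py g).getD k [] := by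
      rw [List.getD_eq_getElem _ _ (by rw [hA, pvStep_length]; simpa using hk)]
    have hrep : (List.replicate n ([] : List (Option Int))).getD k [] = [] := by
      rw [List.getD_eq_getElem _ _ (by simpa using hk)]
      simp
    rw [hAk, hA, pvScatter _ _ hfst k, hrep, List.nil_append]
    -- B's row k
    have hBk : (transform_py_alt g)[k]'h2 =
        (List.range n).flatMap (fun j =>
          if 3 * (j / 3) ≤ k then
            (((g.getD j []).drop (3 * (k - 3 * (j / 3)))).take 3).map pvConv
          else []) := by
      unfold transform_py_alt
      rw [List.getElem_map, List.getElem_range]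
      have hfun : (fun (row : List (Option Int)) (j : Nat) =>
          if 3 * (j / 3) ≤ k then
            row ++ (((g.getD j []).drop (3 * (k - 3 * (j / 3)))).take 3).map pvConv
          else row)
          = fun row j => row ++ (if 3 * (j / 3) ≤ k then
            (((g.getD j []).drop (3 * (k - 3 * (j / 3)))).take 3).map pvConv else []) := by
        funext row j
        by_cases h : 3 * (j / 3) ≤ k <;> simp [h]
      rw [hfun, pvFoldl_append, List.nil_append]
    rw [hBk, List.filter_flatMap, List.map_flatMap]
    apply List.flatMap_congr
    intro j hj
    rw [hopsrow, pvRow_piece]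
    by_cases h : 3 * (j / 3) ≤ k
    · simp [h, List.map_drop, List.map_take]
    · simp [h]
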